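-- pv_equiv track=rewrite | github.com/Agus-DS/Lic-Ciencia-Datos-Intro-Programacion | guia7.py | divide_a_todos
-- ===== SOURCE A (Python) =====
-- def divide_a_todos(lista: list[int], e: int) -> bool:
--     if not lista:
--         divide = False
--         return divide
--
--     divide = True
--     indice = 0
--     while indice < len(lista) :
--         for i in range(len(lista)):
--             if   lista[i] % e != 0:
--                 divide = False
--             indice +=1
--
--
--     return divide
-- ===== SOURCE B (Python) =====
-- def divide_a_todos(lista: list[int], e: int) -> bool:
--     # gcd aggregation: e divides every element iff e divides gcd of the list
--     if not lista:
--         return False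
--     g = 0
--     for x in lista:
--         x = abs(x)
--         while x:
--             g, x = x, g % x
--     return g % e == 0
-- ===== Notes on version B (the rewrite author's own statement) =====
-- stated objective: alternative
-- what changed: Replaces A's redundant nested per-element divisibility scan with a single Euclid-gcd aggregation of the list followed by one divisibility test (e divides all elements iff e divides their gcd).
import Mathlib
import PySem

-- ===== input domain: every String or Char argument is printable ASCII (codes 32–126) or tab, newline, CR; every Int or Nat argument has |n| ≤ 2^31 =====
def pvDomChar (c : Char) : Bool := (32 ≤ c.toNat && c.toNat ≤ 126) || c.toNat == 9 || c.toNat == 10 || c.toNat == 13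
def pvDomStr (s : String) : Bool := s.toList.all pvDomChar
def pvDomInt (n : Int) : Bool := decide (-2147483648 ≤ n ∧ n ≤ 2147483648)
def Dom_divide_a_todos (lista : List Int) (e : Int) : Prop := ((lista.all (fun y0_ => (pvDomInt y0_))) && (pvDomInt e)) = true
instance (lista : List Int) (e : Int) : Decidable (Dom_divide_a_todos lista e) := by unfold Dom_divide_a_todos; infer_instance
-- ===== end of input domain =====

-- B replaces the per-element divisibility scan with a gcd aggregation (Euclid) and one final divisibility test; return-value equivalence, no side effects.

-- ===== PORT A =====
-- the inner 'for i in range(len(lista)): … ; indice += 1' body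
def pvInnerFor (lista : List Int) (e : Int) (divide : Bool) (indice : Int) : Bool × Int :=
  (PySem.List.pyRange 0 (lista.length : Int) 1).foldl
    (fun (s : Bool × Int) i =>
      ((if PySem.Int.mod (PySem.List.pyGetD lista i 0) e ≠ 0 then false else s.1), s.2 + 1))
    (divide, indice)

-- termination fact the while-loop port cites: the inner for advances indice by len(lista)
theorem pvFold_snd (e : Int) (lista : List Int) (r : List Int) (d : Bool) (i : Int) :
    (r.foldl (fun (s : Bool × Int) j =>
      ((if PySem.Int.mod (PySem.List.pyGetD lista j 0) e ≠ 0 then false else s.1), s.2 + 1))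
      (d, i)).2 = i + r.length := by
  induction r generalizing d i with
  | nil => simp
  | cons hd tl ih =>
    rw [List.foldl_cons]
    exact (ih _ _).trans (by push_cast [List.length_cons]; ring)

theorem pvInnerFor_snd (lista : List Int) (e : Int) (divide : Bool) (indice : Int) :
    (pvInnerFor lista e divide indice).2 = indice + lista.length := by
  unfold pvInnerFor
  rw [pvFold_snd]
  simp [PySem.List.length_pyRange_one]

-- the 'while indice < len(lista):' loop (only entered with lista ≠ [], as in A)
def pvWhileA (lista : List Int) (hne : lista ≠ []) (e : Int) (divide : Bool) (indice : Int) : Bool :=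
  if h : indice < (lista.length : Int) then
    let s := pvInnerFor lista e divide indice
    pvWhileA lista hne e s.1 s.2
  else divide
termination_by ((lista.length : Int) - indice).toNat
decreasing_by
  have hs := pvInnerFor_snd lista e divide indice
  have hlen : 0 < lista.length := List.length_pos_iff.mpr hne
  rw [hs]; omega

def divide_a_todos (lista : List Int) (e : Int) : Bool :=
  if h : lista = [] then false -- h unused in this branch; needed for pvWhileA
  else pvWhileA lista h e true 0

-- ===== PORT B =====
-- hand-written Euclid ('while x: g, x = x, g % x'); exact: both arguments stay nonnegative, so Python % = Nat.mod
def pvEuclid (g x : Nat) : Nat :=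
  if h : x = 0 then g else pvEuclid x (g % x)
termination_by x
decreasing_by exact Nat.mod_lt g (Nat.pos_of_ne_zero h)

def divide_a_todos_alt (lista : List Int) (e : Int) : Bool :=
  if lista = [] then false
  else
    let g := lista.foldl (fun g x => pvEuclid g x.natAbs) 0
    PySem.Int.mod (g : Int) e == 0

-- ===== PRECONDITION & SPEC =====
-- Pre_ excludes e = 0 with a non-empty list: there Python A (lista[i] % 0) and Python B (g % 0) both raise ZeroDivisionError.
def Pre_divide_a_todos (lista : List Int) (e : Int) : Prop := lista = [] ∨ e ≠ 0
instance (lista : List Int) (e : Int) : Decidable (Pre_divide_a_todos lista e) := by unfold Pre_divide_a_todos; infer_instance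
def pvWitness_divide_a_todos : List Int × Int := ([6, 9, -12], 3)

def Spec_divide_a_todos (lista : List Int) (e : Int) (out : Bool) : Prop := out = divide_a_todos_alt lista e
instance (lista : List Int) (e : Int) (out : Bool) : Decidable (Spec_divide_a_todos lista e out) := by unfold Spec_divide_a_todos; infer_instance

-- ===== CLAIM (what is proved, stated in full; the proofs are below) =====
def Claim_equal_divide_a_todos : Prop := ∀ (lista : List Int) (e : Int), Dom_divide_a_todos lista e → Pre_divide_a_todos lista e → Spec_divide_a_todos lista e (divide_a_todos lista e)

-- ===== LEMMAS AND PROOFS =====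

theorem pvEuclid_eq_gcd (g x : Nat) : pvEuclid g x = Nat.gcd x g := by
  induction x using Nat.strong_induction_on generalizing g with
  | _ x ih =>
    rw [pvEuclid]
    by_cases h : x = 0
    · simp [h]
    · rw [dif_neg h, ih (g % x) (Nat.mod_lt g (Nat.pos_of_ne_zero h)) x]
      exact (Nat.gcd_rec x g).symm

theorem pvFoldl_gcd_dvd (l : List Int) (a n : Nat) :
    (n ∣ l.foldl (fun g x => pvEuclid g x.natAbs) a) ↔ (n ∣ a ∧ ∀ x ∈ l, n ∣ x.natAbs) := by
  induction l generalizing a with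
  | nil => simp
  | cons x t ih =>
    rw [List.foldl_cons, ih]
    rw [pvEuclid_eq_gcd]
    constructor
    · rintro ⟨hga, ht⟩
      refine ⟨hga.trans (Nat.gcd_dvd_right _ _), fun y hy => ?_⟩
      rcases List.mem_cons.mp hy with h | h
      · exact h ▸ hga.trans (Nat.gcd_dvd_left _ _)
      · exact ht y h
    · rintro ⟨ha, ht⟩
      exact ⟨Nat.dvd_gcd (ht x (List.mem_cons_self)) ha,
             fun y hy => ht y (List.mem_cons_of_mem _ hy)⟩

theorem pvFold_fst (e : Int) (lista : List Int) (r : List Int) (d : Bool) (i : Int) :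
    (r.foldl (fun (s : Bool × Int) j =>
      ((if PySem.Int.mod (PySem.List.pyGetD lista j 0) e ≠ 0 then false else s.1), s.2 + 1))
      (d, i)).1 = (d && r.all (fun j => PySem.Int.mod (PySem.List.pyGetD lista j 0) e == 0)) := by
  induction r generalizing d i with
  | nil => simp
  | cons hd tl ih =>
    rw [List.foldl_cons]
    refine (ih _ _).trans ?_
    by_cases h : PySem.Int.mod (PySem.List.pyGetD lista hd 0) e = 0 <;> simp [h]

theorem pvInnerFor_fst (lista : List Int) (e : Int) (divide : Bool) (indice : Int) :
    (pvInnerFor lista e divide indice).1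
      = (divide && lista.all (fun x => PySem.Int.mod x e == 0)) := by
  unfold pvInnerFor
  rw [pvFold_fst]
  conv_rhs => rw [← PySem.List.map_pyGetD_pyRange_zero' lista (0 : Int), List.all_map]
  rfl

theorem pvA_eq_all (lista : List Int) (hne : lista ≠ []) (e : Int) :
    divide_a_todos lista e = lista.all (fun x => PySem.Int.mod x e == 0) := by
  have hlen : 0 < lista.length := List.length_pos_iff.mpr hne
  unfold divide_a_todos
  rw [dif_neg hne, pvWhileA, dif_pos (by exact_mod_cast hlen)]
  show pvWhileA lista hne e (pvInnerFor lista e true 0).1 (pvInnerFor lista e true 0).2 = _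
  rw [pvWhileA, pvInnerFor_snd, dif_neg (by simp), pvInnerFor_fst]
  simp

-- ===== VERDICT (by name: the statement is the Claim_ definition above) =====
theorem divide_a_todos_spec : Claim_equal_divide_a_todos := by
  intro lista e _ _
  unfold Spec_divide_a_todos
  by_cases h : lista = []
  · subst h; simp [divide_a_todos, divide_a_todos_alt]
  · rw [pvA_eq_all lista h e]
    unfold divide_a_todos_alt
    rw [if_neg h, Bool.eq_iff_iff]
    simp only [List.all_eq_true, beq_iff_eq, PySem.Int.mod_eq_zero_iff_dvd]
    rw [← Int.natAbs_dvd_natAbs, Int.natAbs_natCast,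
        pvFoldl_gcd_dvd lista 0 e.natAbs]
    simp [Int.natAbs_dvd_natAbs]
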